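-- pv_equiv track=rewrite | github.com/jakubsmihula/hamiltonicity-of-cages | scripts/src/sufficient_conditions.py | satisfies_ore
-- ===== SOURCE A (Python) =====
-- def satisfies_ore(graph):
--     n = len(graph)
--     if n < 3:
--         return False
--     for u in graph:
--         for v in graph:
--             if u != v and v not in graph[u]:
--                 deg_u = len(graph[u])
--                 deg_v = len(graph[v])
--                 if deg_u + deg_v < n:
--                     return False
--     return True
-- ===== SOURCE B (Python) =====
-- def satisfies_ore(graph):
--     n = len(graph)
--     if n < 3:
--         return False
--     deg = {u: len(adj) for u, adj in graph.items()}
--     order = sorted(graph, key=lambda u: deg[u])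
--     for u, adj in graph.items():
--         nbrs = set(adj)
--         du = len(adj)
--         for v in order:
--             if v != u and v not in nbrs:
--                 # v is a minimum-degree non-neighbour of u; if the Ore sum
--                 # holds for it, it holds for every non-neighbour of u.
--                 if du + deg[v] < n:
--                     return False
--                 break
--     return True
-- ===== Notes on version B (the rewrite author's own statement) =====
-- stated objective: alternative
-- what changed: Instead of testing the Ore inequality on every ordered pair of vertices, B sorts the vertices by degree once and, for each vertex u, scans that sorted order only until the first (minimum-degree) non-neighbour of u, which decides the inequality for all non-neighbours of u at once; it trades A's immediate early exit for a one-off sort, so it is not measurably faster on early-failing inputs.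
import Mathlib
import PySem

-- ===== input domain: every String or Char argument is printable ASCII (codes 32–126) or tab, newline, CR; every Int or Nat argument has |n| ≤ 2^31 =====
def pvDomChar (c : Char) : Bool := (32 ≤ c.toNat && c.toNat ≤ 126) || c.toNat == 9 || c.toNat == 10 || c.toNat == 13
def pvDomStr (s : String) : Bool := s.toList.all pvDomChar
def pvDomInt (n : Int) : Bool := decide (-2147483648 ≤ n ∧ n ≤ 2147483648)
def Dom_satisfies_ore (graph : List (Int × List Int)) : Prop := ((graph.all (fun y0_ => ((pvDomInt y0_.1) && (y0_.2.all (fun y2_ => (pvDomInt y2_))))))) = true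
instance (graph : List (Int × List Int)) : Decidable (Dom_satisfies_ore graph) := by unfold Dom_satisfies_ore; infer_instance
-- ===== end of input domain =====

-- B replaces A's all-ordered-pairs Ore check by a sort-by-degree plus a per-vertex
-- scan to the FIRST (minimum-degree) non-neighbour; objective: alternative algorithm.

-- ===== PORT A =====
-- A: n = len(graph); if n < 3 return False; for u in graph: for v in graph:
--    if u != v and v not in graph[u]: if len(graph[u]) + len(graph[v]) < n: return False; return True
-- The early 'return False' loop is ported as `List.all` of the negation of the failing condition.
def satisfies_ore (graph : List (Int × List Int)) : Bool :=
  let n : Int := PySem.List.len graph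
  if n < 3 then false
  else
    graph.all (fun u =>
      graph.all (fun v =>
        !(decide (u.1 ≠ v.1) &&
          !((PySem.Dict.mk graph).getD u.1 []).contains v.1 &&
          decide (PySem.List.len ((PySem.Dict.mk graph).getD u.1 []) +
                  PySem.List.len ((PySem.Dict.mk graph).getD v.1 []) < n))))

-- ===== PORT B =====
-- inner loop of Source B: 'for v in order: if v != u and v not in nbrs: …; break'
def oreScan (deg : PySem.Dict Int Int) (n du u : Int) (nbrs : PySem.Set Int) : List Int → Bool
  | [] => true
  | v :: rest =>
    if v ≠ u ∧ nbrs.contains v = false then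
      !decide (du + deg.getD v 0 < n)
    else oreScan deg n du u nbrs rest

def satisfies_ore_alt (graph : List (Int × List Int)) : Bool :=
  let n : Int := PySem.List.len graph
  if n < 3 then false
  else
    let deg : PySem.Dict Int Int :=
      graph.foldl (fun d p => d.insert p.1 (PySem.List.len p.2)) PySem.Dict.empty
    -- deg[v] in Source B never raises (v is a key), so getD with default 0 is exact here
    let order := PySem.List.sorted (graph.map Prod.fst) (fun u => deg.getD u 0) false
    graph.all (fun p => oreScan deg n (PySem.List.len p.2) p.1 (PySem.Set.ofList p.2) order)

-- ===== PRECONDITION & SPEC =====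
-- Pre_: the association list is a genuine Python dict, i.e. its keys are distinct
-- (the Python argument is a dict, so every real input satisfies this).
def Pre_satisfies_ore (graph : List (Int × List Int)) : Prop := (graph.map Prod.fst).Nodup
instance (graph : List (Int × List Int)) : Decidable (Pre_satisfies_ore graph) := by
  unfold Pre_satisfies_ore; infer_instance

def pvWitness_satisfies_ore : (List (Int × List Int)) :=
  [(0, [1, 2]), (1, [0, 2]), (2, [0, 1])]

def Spec_satisfies_ore (graph : List (Int × List Int)) (out : Bool) : Prop := out = satisfies_ore_alt graph
instance (graph : List (Int × List Int)) (out : Bool) : Decidable (Spec_satisfies_ore graph out) := by unfold Spec_satisfies_ore; infer_instance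

-- ===== CLAIM (what is proved, stated in full; the proofs are below) =====
def Claim_equal_satisfies_ore : Prop := ∀ (graph : List (Int × List Int)), Dom_satisfies_ore graph → Pre_satisfies_ore graph → Spec_satisfies_ore graph (satisfies_ore graph)

-- ===== LEMMAS AND PROOFS =====

-- The degree dictionary built by Source B looks up the adjacency length of any key.
theorem deg_getD (graph : List (Int × List Int)) (h : (graph.map Prod.fst).Nodup)
    (p : Int × List Int) (hp : p ∈ graph) :
    (graph.foldl (fun (d : PySem.Dict Int Int) q => d.insert q.1 (PySem.List.len q.2)) PySem.Dict.empty).getD p.1 0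
      = PySem.List.len p.2 := by
  have hitems : (graph.foldl (fun (d : PySem.Dict Int Int) q => d.insert q.1 (PySem.List.len q.2)) PySem.Dict.empty).items
      = graph.map (fun q => (q.1, PySem.List.len q.2)) := by
    have := PySem.Dict.items_foldl_insert_fresh graph Prod.fst
      (fun q => PySem.List.len q.2) (PySem.Dict.empty : PySem.Dict Int Int)
      (by intro a _; rfl) (by simpa using h)
    simpa using this
  refine PySem.Dict.getD_of_mem_items _ ?_ ?_ _
  · rw [hitems]; exact List.mem_map.mpr ⟨p, hp, rfl⟩
  · simp only [PySem.Dict.keys, hitems]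
    simpa [Function.comp] using h

-- The dict A reads agrees with the pair being iterated, given distinct keys.
theorem graph_getD (graph : List (Int × List Int)) (h : (graph.map Prod.fst).Nodup)
    (p : Int × List Int) (hp : p ∈ graph) :
    (PySem.Dict.mk graph).getD p.1 [] = p.2 :=
  PySem.Dict.getD_of_mem_items (d := PySem.Dict.mk graph) hp
    (by simpa [PySem.Dict.keys, Function.comp] using h) []

-- the Ore condition relative to a fixed vertex (u, adj): every non-neighbour key v has deg u + deg v ≥ n
def OreOK (graph : List (Int × List Int)) (n : Int) (p : Int × List Int) : Prop :=
  ∀ q ∈ graph, p.1 ≠ q.1 → q.1 ∉ p.2 → ¬ (PySem.List.len p.2 + PySem.List.len q.2 < n)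

-- If the scan returns true on a degree-sorted list, every hit in the list satisfies the bound.
theorem oreScan_true_forall (deg : PySem.Dict Int Int) (n du u : Int) (nbrs : PySem.Set Int)
    (l : List Int) (hsort : l.Pairwise (fun a b => deg.getD a 0 ≤ deg.getD b 0))
    (htrue : oreScan deg n du u nbrs l = true) :
    ∀ v ∈ l, v ≠ u → nbrs.contains v = false → ¬ (du + deg.getD v 0 < n) := by
  induction l with
  | nil => intro v hv; simp at hv
  | cons w rest ih =>
    intro v hv hvne hvnb
    rcases List.pairwise_cons.mp hsort with ⟨hw, hrest⟩
    by_cases hhit : w ≠ u ∧ nbrs.contains w = false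
    · have hge : ¬ (du + deg.getD w 0 < n) := by
        simp only [oreScan, if_pos hhit] at htrue
        simpa using htrue
      rcases List.mem_cons.mp hv with rfl | hv'
      · exact hge
      · have := hw v hv'
        omega
    · simp only [oreScan, if_neg hhit] at htrue
      rcases List.mem_cons.mp hv with rfl | hv'
      · exact absurd ⟨hvne, hvnb⟩ hhit
      · exact ih hrest htrue v hv' hvne hvnb

-- Conversely, if every hit satisfies the bound the scan returns true.
theorem oreScan_forall_true (deg : PySem.Dict Int Int) (n du u : Int) (nbrs : PySem.Set Int)
    (l : List Int)
    (hall : ∀ v ∈ l, v ≠ u → nbrs.contains v = false → ¬ (du + deg.getD v 0 < n)) :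
    oreScan deg n du u nbrs l = true := by
  induction l with
  | nil => rfl
  | cons w rest ih =>
    by_cases hhit : w ≠ u ∧ nbrs.contains w = false
    · simp only [oreScan, if_pos hhit]
      simpa using hall w (List.mem_cons_self) hhit.1 hhit.2
    · simp only [oreScan, if_neg hhit]
      exact ih (fun v hv => hall v (List.mem_cons_of_mem _ hv))

-- A's inner loop over all v equals OreOK, under distinct keys.
theorem innerA_iff (graph : List (Int × List Int)) (h : (graph.map Prod.fst).Nodup)
    (n : Int) (p : Int × List Int) (hp : p ∈ graph) :
    (graph.all (fun v =>
        !(decide (p.1 ≠ v.1) &&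
          !((PySem.Dict.mk graph).getD p.1 []).contains v.1 &&
          decide (PySem.List.len ((PySem.Dict.mk graph).getD p.1 []) +
                  PySem.List.len ((PySem.Dict.mk graph).getD v.1 []) < n))) = true)
      ↔ OreOK graph n p := by
  rw [List.all_eq_true]
  constructor
  · intro hforall q hq hne hnotmem
    have := hforall q hq
    rw [graph_getD graph h p hp, graph_getD graph h q hq] at this
    simp only [Bool.not_eq_true', Bool.and_eq_false_iff] at this
    rcases this with (h1 | h1) | h1
    · simp at h1; exact absurd h1 hne
    · simp at h1; exact absurd h1 hnotmem
    · simpa using h1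
  · intro hok q hq
    rw [graph_getD graph h p hp, graph_getD graph h q hq]
    by_cases hne : p.1 ≠ q.1
    · by_cases hmem : q.1 ∈ p.2
      · simp [hmem]
      · have := hok q hq hne hmem
        simp only [PySem.List.len_eq] at this
        simp [hne, hmem]
        omega
  
    · simp at hne; simp [hne]

-- B's scan of the degree-sorted key list equals OreOK, under distinct keys.
theorem innerB_iff (graph : List (Int × List Int)) (h : (graph.map Prod.fst).Nodup)
    (n : Int) (p : Int × List Int) (_hp : p ∈ graph) :
    (oreScan (graph.foldl (fun (d : PySem.Dict Int Int) q => d.insert q.1 (PySem.List.len q.2)) PySem.Dict.empty)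
        n (PySem.List.len p.2) p.1 (PySem.Set.ofList p.2)
        (PySem.List.sorted (graph.map Prod.fst)
          (fun u => (graph.foldl (fun (d : PySem.Dict Int Int) q => d.insert q.1 (PySem.List.len q.2)) PySem.Dict.empty).getD u 0) false)
      = true) ↔ OreOK graph n p := by
  set deg := graph.foldl (fun (d : PySem.Dict Int Int) q => d.insert q.1 (PySem.List.len q.2)) PySem.Dict.empty with hdeg
  set order := PySem.List.sorted (graph.map Prod.fst) (fun u => deg.getD u 0) false with horder
  have hsort : order.Pairwise (fun a b => deg.getD a 0 ≤ deg.getD b 0) :=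
    PySem.List.sorted_pairwise _ _
  have hcont : ∀ x, (PySem.Set.ofList p.2).contains x = p.2.contains x := by
    intro x; simp [pysem]
  constructor
  · intro htrue q hq hne hnotmem
    have hqmem : q.1 ∈ order := by
      rw [horder, PySem.List.mem_sorted]
      exact List.mem_map.mpr ⟨q, hq, rfl⟩
    have := oreScan_true_forall deg n (PySem.List.len p.2) p.1 (PySem.Set.ofList p.2)
      order hsort htrue q.1 hqmem (fun he => hne he.symm)
      (by rw [hcont]; simpa using hnotmem)
    rwa [deg_getD graph h q hq] at this
  · intro hok
    apply oreScan_forall_true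
    intro v hv hvne hvnb
    have hvkey : v ∈ graph.map Prod.fst := by
      rw [horder, PySem.List.mem_sorted] at hv; exact hv
    rcases List.mem_map.mp hvkey with ⟨q, hq, rfl⟩
    rw [deg_getD graph h q hq]
    rw [hcont] at hvnb
    exact hok q hq (fun he => hvne he.symm) (by simpa using hvnb)

-- ===== VERDICT (by name: the statement is the Claim_ definition above) =====
theorem satisfies_ore_spec : Claim_equal_satisfies_ore := by
  intro graph _ hpre
  unfold Spec_satisfies_ore
  by_cases hn : (PySem.List.len graph : Int) < 3
  · simp only [satisfies_ore, satisfies_ore_alt, if_pos hn]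
  · simp only [satisfies_ore, satisfies_ore_alt, if_neg hn]
    rw [Bool.eq_iff_iff, List.all_eq_true, List.all_eq_true]
    constructor
    · intro hA p hp
      exact (innerB_iff graph hpre _ p hp).mpr ((innerA_iff graph hpre _ p hp).mp (hA p hp))
    · intro hB p hp
      exact (innerA_iff graph hpre _ p hp).mpr ((innerB_iff graph hpre _ p hp).mp (hB p hp))
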